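-- pv_equiv track=rewrite | github.com/joaopedromendonca/timetotext | seconds_to_text.py | convert
-- ===== SOURCE A (Python) =====
-- def convert(seconds: int) -> str:
--     if seconds == 0:
--         return "now"
--
--     minutes = 60
--     hours = 3600
--     days = 86400
--     years = 31536000
--
--     res = {}
--     while seconds > 0:
--         #sec
--         if seconds == 1:
--             res['second'] = 1
--             break
--         #secs
--         if seconds < minutes:
--             res['second'] = seconds
--             break
--         #mins
--         if seconds < hours:
--             m = seconds // minutes
--             res['minute'] = m
--             seconds = seconds%minutes
--             continue
--         #hours
--         if seconds < days:
--             h = seconds // hours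
--             res['hour'] = h
--             seconds = seconds%hours
--             continue
--         #days
--         if seconds < years:
--             d = seconds // days
--             res['day'] = d
--             seconds = seconds%days
--             continue
--         #years
--         y = seconds // years
--         res['year'] = y
--         seconds = seconds%years
--
--     fstr = ""
--     for i,j in enumerate(res):
--         if (atual:=i+1) == len(res):
--             if res[j] > 1:
--                 fstr = fstr + f"{res[j]} {j}s"
--             else:
--                 fstr = fstr + f"{res[j]} {j}"
--             continue
--         if (atual:=i+2) < len(res):
--             if res[j] > 1:
--                 fstr = fstr + f"{res[j]} {j}s, "
--             else:
--                 fstr = fstr + f"{res[j]} {j}, "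
--             continue
--         if res[j] > 1:
--             fstr = fstr + f"{res[j]} {j}s and "
--         else:
--             fstr = fstr + f"{res[j]} {j} and "
--     return(fstr)
-- ===== SOURCE B (Python) =====
-- UNITS = [("year", 31536000), ("day", 86400), ("hour", 3600), ("minute", 60), ("second", 1)]
--
-- def convert(seconds: int) -> str:
--     if seconds == 0:
--         return "now"
--     if seconds < 0:
--         return ""
--     parts = []
--     for name, size in UNITS:
--         q, seconds = divmod(seconds, size)
--         if q > 0:
--             parts.append(f"{q} {name}" + ("s" if q > 1 else ""))
--     if len(parts) == 1:
--         return parts[0]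
--     return ", ".join(parts[:-1]) + " and " + parts[-1]
-- ===== Notes on version B (the rewrite author's own statement) =====
-- stated objective: simpler
-- what changed: A's restart-the-whole-ladder while loop (re-testing every unit bound each iteration) and its index-counting enumerate/walrus formatting fold are replaced by one divmod pass over a fixed (unit, size) table collecting the nonzero piece strings, assembled with ', '.join on all but the last piece plus ' and ' before it.
import Mathlib
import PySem

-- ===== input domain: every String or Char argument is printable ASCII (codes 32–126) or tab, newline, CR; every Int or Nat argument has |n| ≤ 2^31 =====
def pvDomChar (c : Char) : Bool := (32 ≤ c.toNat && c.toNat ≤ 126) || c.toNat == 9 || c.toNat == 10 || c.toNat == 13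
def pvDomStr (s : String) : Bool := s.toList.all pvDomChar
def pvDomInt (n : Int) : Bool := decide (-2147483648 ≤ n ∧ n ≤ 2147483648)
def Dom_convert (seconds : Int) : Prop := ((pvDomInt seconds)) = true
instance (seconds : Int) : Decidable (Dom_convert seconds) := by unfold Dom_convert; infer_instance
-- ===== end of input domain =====

-- B rewrites A's restart-the-ladder while-loop as one divmod pass over a fixed unit table and
-- replaces the index-counting formatting fold by a join of the pieces (objective: simpler).

-- ===== PORT A =====
-- the while-loop: each iteration either breaks (inserting the final 'second' entry) or divides by
-- one unit and continues with the remainder; it performs at most five productive iterations (one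
-- per unit, the divisor ladder only descends), so the structural fuel of 8 it is called with is
-- never exhausted -- a totality guard only, not a change of algorithm
def convertLoop : Nat → Int → PySem.Dict String Int → PySem.Dict String Int
  | 0, _, res => res
  | fuel + 1, seconds, res =>
    if 0 < seconds then
      if seconds = 1 then res.insert "second" 1
      else if seconds < 60 then res.insert "second" seconds
      else if seconds < 3600 then
        convertLoop fuel (PySem.Int.mod seconds 60) (res.insert "minute" (PySem.Int.floordiv seconds 60))
      else if seconds < 86400 then
        convertLoop fuel (PySem.Int.mod seconds 3600) (res.insert "hour" (PySem.Int.floordiv seconds 3600))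
      else if seconds < 31536000 then
        convertLoop fuel (PySem.Int.mod seconds 86400) (res.insert "day" (PySem.Int.floordiv seconds 86400))
      else
        convertLoop fuel (PySem.Int.mod seconds 31536000) (res.insert "year" (PySem.Int.floordiv seconds 31536000))
    else res

-- 'for i,j in enumerate(res): … res[j] …' iterates the dict's keys in insertion order and looks
-- each one up; since dict keys are unique this reads exactly the i-th item's value, ported here
-- by iterating the (key, value) items directly
def convertFmt (res : PySem.Dict String Int) : String :=
  (PySem.List.enumerate res.items 0).foldl (fun fstr x =>
    if x.1 + 1 = (res.size : Int) then
      if x.2.2 > 1 then fstr ++ (PySem.Int.toStr x.2.2 ++ " " ++ x.2.1 ++ "s")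
      else fstr ++ (PySem.Int.toStr x.2.2 ++ " " ++ x.2.1)
    else if x.1 + 2 < (res.size : Int) then
      if x.2.2 > 1 then fstr ++ (PySem.Int.toStr x.2.2 ++ " " ++ x.2.1 ++ "s, ")
      else fstr ++ (PySem.Int.toStr x.2.2 ++ " " ++ x.2.1 ++ ", ")
    else
      if x.2.2 > 1 then fstr ++ (PySem.Int.toStr x.2.2 ++ " " ++ x.2.1 ++ "s and ")
      else fstr ++ (PySem.Int.toStr x.2.2 ++ " " ++ x.2.1 ++ " and ")) ""

def convert (seconds : Int) : String :=
  if seconds = 0 then "now" else convertFmt (convertLoop 8 seconds PySem.Dict.empty)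

-- ===== PORT B =====
def unitsB : List (String × Int) :=
  [("year", 31536000), ("day", 86400), ("hour", 3600), ("minute", 60), ("second", 1)]

def convert_alt (seconds : Int) : String :=
  if seconds = 0 then "now"
  else if seconds < 0 then ""
  else
    let parts := (unitsB.foldl (fun (st : List String × Int) u =>
      (if PySem.Int.floordiv st.2 u.2 > 0 then
         st.1 ++ [PySem.Int.toStr (PySem.Int.floordiv st.2 u.2) ++ " " ++ u.1 ++
                  (if PySem.Int.floordiv st.2 u.2 > 1 then "s" else "")]
       else st.1, PySem.Int.mod st.2 u.2)) ([], seconds)).1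
    if parts.length = 1 then (PySem.List.pyGet? parts 0).getD ""
    else PySem.Str.join ", " (PySem.List.slice parts none (some (-1))) ++ " and " ++
         (PySem.List.pyGet? parts (-1)).getD ""

-- ===== PRECONDITION & SPEC =====
def Spec_convert (seconds : Int) (out : String) : Prop := out = convert_alt seconds
instance (seconds : Int) (out : String) : Decidable (Spec_convert seconds out) := by unfold Spec_convert; infer_instance

-- ===== CLAIM (what is proved, stated in full; the proofs are below) =====
def Claim_equal_convert : Prop := ∀ (seconds : Int), Dom_convert seconds → Spec_convert seconds (convert seconds)

-- ===== LEMMAS AND PROOFS =====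

-- the list of nonzero (unit, count) entries produced by repeated divmod down the unit table
def pvEntry (n : String) (q : Int) : List (String × Int) := if q > 0 then [(n, q)] else []

def pvDecomp : List (String × Int) → Int → List (String × Int)
  | [], _ => []
  | (n, u) :: rest, s => pvEntry n (PySem.Int.floordiv s u) ++ pvDecomp rest (PySem.Int.mod s u)

def pvPiece (p : String × Int) : String :=
  PySem.Int.toStr p.2 ++ " " ++ p.1 ++ (if p.2 > 1 then "s" else "")

-- A's formatting fold, rephrased as recursion on the remaining items
def pvFmtR : List (String × Int) → String
  | [] => ""
  | [p] => if p.2 > 1 then PySem.Int.toStr p.2 ++ " " ++ p.1 ++ "s"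
           else PySem.Int.toStr p.2 ++ " " ++ p.1
  | p :: q :: rest =>
    (if rest.isEmpty then
       if p.2 > 1 then PySem.Int.toStr p.2 ++ " " ++ p.1 ++ "s and "
       else PySem.Int.toStr p.2 ++ " " ++ p.1 ++ " and "
     else
       if p.2 > 1 then PySem.Int.toStr p.2 ++ " " ++ p.1 ++ "s, "
       else PySem.Int.toStr p.2 ++ " " ++ p.1 ++ ", ") ++ pvFmtR (q :: rest)

-- B's assembly of the final string from the list of piece strings
def pvAssemble (parts : List String) : String :=
  if parts.length = 1 then (PySem.List.pyGet? parts 0).getD ""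
  else PySem.Str.join ", " (PySem.List.slice parts none (some (-1))) ++ " and " ++
       (PySem.List.pyGet? parts (-1)).getD ""


lemma loop_lt60 (fuel : Nat) (l : List (String × Int)) (s : Int)
    (hf : (PySem.Dict.mk l).contains "second" = false) (h0 : 0 ≤ s) (h2 : s < 60) :
    convertLoop (fuel + 1) s (PySem.Dict.mk l) = PySem.Dict.mk (l ++ pvDecomp [("second", 1)] s) := by
  have hd1 : PySem.Int.floordiv s 1 = s := by
    rw [PySem.Int.floordiv_eq_ediv_of_pos (by omega)]; omega
  rw [convertLoop]
  by_cases hs : 0 < s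
  · by_cases hs1 : s = 1
    · subst hs1
      simp [pvDecomp, pvEntry, PySem.Dict.insert, hf]
    · simp [hs, hs1, h2, pvDecomp, pvEntry, PySem.Dict.insert, hf]
  · have hz : s = 0 := by omega
    subst hz
    simp [pvDecomp, pvEntry]


lemma loop_lt3600 (fuel : Nat) (l : List (String × Int)) (s : Int)
    (hf1 : (PySem.Dict.mk l).contains "minute" = false)
    (hf2 : (PySem.Dict.mk l).contains "second" = false) (h0 : 0 ≤ s) (h2 : s < 3600) :
    convertLoop (fuel + 1 + 1) s (PySem.Dict.mk l) = PySem.Dict.mk (l ++ pvDecomp [("minute", 60), ("second", 1)] s) := by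
  by_cases hlt : s < 60
  · rw [loop_lt60 (fuel + 1) l s hf2 h0 hlt]
    simp [pvDecomp, pvEntry]
    have a1 : s / 60 = 0 := by omega
    have a2 : s % 60 = s := by omega
    simp [a1, a2]
  · have hq : 0 < PySem.Int.floordiv s 60 := by
      rw [PySem.Int.floordiv_eq_ediv_of_pos (by omega)]; omega
    have hm0 := PySem.Int.mod_nonneg s (b := 60) (by omega)
    have hm1 := PySem.Int.mod_lt s (b := 60) (by omega)
    rw [convertLoop]
    simp only [PySem.Dict.insert, PySem.Dict.contains] at hf1 ⊢
    simp only [hf1]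
    have hf2' : (PySem.Dict.mk (l ++ [("minute", PySem.Int.floordiv s 60)])).contains "second" = false := by
      simp only [PySem.Dict.contains] at hf2 ⊢
      simp [hf2]
    rw [if_pos (by omega), if_neg (by omega), if_neg (by omega), if_pos h2, if_neg (by simp)]
    rw [loop_lt60 fuel _ _ hf2' hm0 hm1]
    simp [pvDecomp, pvEntry]
    have a1 : 0 < s / 60 := by omega
    simp [a1]


lemma loop_lt86400 (fuel : Nat) (l : List (String × Int)) (s : Int)
    (hf1 : (PySem.Dict.mk l).contains "hour" = false)
    (hf2 : (PySem.Dict.mk l).contains "minute" = false)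
    (hf3 : (PySem.Dict.mk l).contains "second" = false) (h0 : 0 ≤ s) (h2 : s < 86400) :
    convertLoop (fuel + 1 + 1 + 1) s (PySem.Dict.mk l) =
      PySem.Dict.mk (l ++ pvDecomp [("hour", 3600), ("minute", 60), ("second", 1)] s) := by
  by_cases hlt : s < 3600
  · have e1 : PySem.Int.floordiv s 3600 = 0 := by
      rw [PySem.Int.floordiv_eq_ediv_of_pos (by omega)]; omega
    have e2 : PySem.Int.mod s 3600 = s := by
      rw [PySem.Int.mod_eq_emod_of_pos (by omega)]; omega
    rw [loop_lt3600 (fuel + 1) l s hf2 hf3 h0 hlt]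
    simp [pvDecomp, pvEntry]
    have a1 : s / 3600 = 0 := by omega
    have a2 : s % 3600 = s := by omega
    simp [a1, a2]
  · have hq : 0 < PySem.Int.floordiv s 3600 := by
      rw [PySem.Int.floordiv_eq_ediv_of_pos (by omega)]; omega
    have hm0 := PySem.Int.mod_nonneg s (b := 3600) (by omega)
    have hm1 := PySem.Int.mod_lt s (b := 3600) (by omega)
    rw [convertLoop]
    simp only [PySem.Dict.insert, PySem.Dict.contains] at hf1 ⊢
    simp only [hf1]
    have hf2' : (PySem.Dict.mk (l ++ [("hour", PySem.Int.floordiv s 3600)])).contains "minute" = false := by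
      simp only [PySem.Dict.contains] at hf2 ⊢
      simp [hf2]
    have hf3' : (PySem.Dict.mk (l ++ [("hour", PySem.Int.floordiv s 3600)])).contains "second" = false := by
      simp only [PySem.Dict.contains] at hf3 ⊢
      simp [hf3]
    rw [if_pos (by omega), if_neg (by omega), if_neg (by omega), if_neg (by omega), if_pos h2, if_neg (by simp)]
    rw [loop_lt3600 fuel _ _ hf2' hf3' hm0 hm1]
    simp [pvDecomp, pvEntry]
    have a1 : 0 < s / 3600 := by omega
    simp [a1]


lemma loop_ltYear (fuel : Nat) (l : List (String × Int)) (s : Int)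
    (hf1 : (PySem.Dict.mk l).contains "day" = false)
    (hf2 : (PySem.Dict.mk l).contains "hour" = false)
    (hf3 : (PySem.Dict.mk l).contains "minute" = false)
    (hf4 : (PySem.Dict.mk l).contains "second" = false) (h0 : 0 ≤ s) (h2 : s < 31536000) :
    convertLoop (fuel + 1 + 1 + 1 + 1) s (PySem.Dict.mk l) =
      PySem.Dict.mk (l ++ pvDecomp [("day", 86400), ("hour", 3600), ("minute", 60), ("second", 1)] s) := by
  by_cases hlt : s < 86400
  · have e1 : PySem.Int.floordiv s 86400 = 0 := by
      rw [PySem.Int.floordiv_eq_ediv_of_pos (by omega)]; omega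
    have e2 : PySem.Int.mod s 86400 = s := by
      rw [PySem.Int.mod_eq_emod_of_pos (by omega)]; omega
    rw [loop_lt86400 (fuel + 1) l s hf2 hf3 hf4 h0 hlt]
    simp [pvDecomp, pvEntry]
    have a1 : s / 86400 = 0 := by omega
    have a2 : s % 86400 = s := by omega
    simp [a1, a2]
  · have hq : 0 < PySem.Int.floordiv s 86400 := by
      rw [PySem.Int.floordiv_eq_ediv_of_pos (by omega)]; omega
    have hm0 := PySem.Int.mod_nonneg s (b := 86400) (by omega)
    have hm1 := PySem.Int.mod_lt s (b := 86400) (by omega)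
    rw [convertLoop]
    simp only [PySem.Dict.insert, PySem.Dict.contains] at hf1 ⊢
    simp only [hf1]
    have hf2' : (PySem.Dict.mk (l ++ [("day", PySem.Int.floordiv s 86400)])).contains "hour" = false := by
      simp only [PySem.Dict.contains] at hf2 ⊢
      simp [hf2]
    have hf3' : (PySem.Dict.mk (l ++ [("day", PySem.Int.floordiv s 86400)])).contains "minute" = false := by
      simp only [PySem.Dict.contains] at hf3 ⊢
      simp [hf3]
    have hf4' : (PySem.Dict.mk (l ++ [("day", PySem.Int.floordiv s 86400)])).contains "second" = false := by
      simp only [PySem.Dict.contains] at hf4 ⊢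
      simp [hf4]
    rw [if_pos (by omega), if_neg (by omega), if_neg (by omega), if_neg (by omega), if_neg (by omega),
        if_pos h2, if_neg (by simp)]
    rw [loop_lt86400 fuel _ _ hf2' hf3' hf4' hm0 hm1]
    simp [pvDecomp, pvEntry]
    have a1 : 0 < s / 86400 := by omega
    simp [a1]


lemma loop_top (fuel : Nat) (s : Int) (h0 : 0 ≤ s) :
    convertLoop (fuel + 1 + 1 + 1 + 1 + 1) s PySem.Dict.empty = PySem.Dict.mk (pvDecomp unitsB s) := by
  have hempty : (PySem.Dict.empty : PySem.Dict String Int) = PySem.Dict.mk [] := rfl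
  by_cases hlt : s < 31536000
  · have e1 : PySem.Int.floordiv s 31536000 = 0 := by
      rw [PySem.Int.floordiv_eq_ediv_of_pos (by omega)]; omega
    have e2 : PySem.Int.mod s 31536000 = s := by
      rw [PySem.Int.mod_eq_emod_of_pos (by omega)]; omega
    rw [hempty, loop_ltYear (fuel + 1) [] s (by simp [PySem.Dict.contains]) (by simp [PySem.Dict.contains])
      (by simp [PySem.Dict.contains]) (by simp [PySem.Dict.contains]) h0 hlt]
    simp [unitsB, pvDecomp, pvEntry]
    have a1 : s / 31536000 = 0 := by omega
    have a2 : s % 31536000 = s := by omega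
    simp [a1, a2]
  · have hq : 0 < PySem.Int.floordiv s 31536000 := by
      rw [PySem.Int.floordiv_eq_ediv_of_pos (by omega)]; omega
    have hm0 := PySem.Int.mod_nonneg s (b := 31536000) (by omega)
    have hm1 := PySem.Int.mod_lt s (b := 31536000) (by omega)
    rw [hempty, convertLoop]
    rw [if_pos (by omega), if_neg (by omega), if_neg (by omega), if_neg (by omega), if_neg (by omega),
        if_neg (by omega)]
    have hins : (PySem.Dict.mk ([] : List (String × Int))).insert "year" (PySem.Int.floordiv s 31536000)
        = PySem.Dict.mk [("year", PySem.Int.floordiv s 31536000)] := by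
      simp [PySem.Dict.insert, PySem.Dict.contains]
    rw [hins, loop_ltYear fuel _ _ (by simp [PySem.Dict.contains]) (by simp [PySem.Dict.contains])
      (by simp [PySem.Dict.contains]) (by simp [PySem.Dict.contains]) hm0 hm1]
    simp [unitsB, pvDecomp, pvEntry]
    have a1 : 0 < s / 31536000 := by omega
    simp [a1]


lemma decomp_ne_nil (s : Int) (h : 0 < s) : pvDecomp unitsB s ≠ [] := by
  have d1 : ∀ a : Int, PySem.Int.floordiv a 31536000 = a / 31536000 := fun a =>
    PySem.Int.floordiv_eq_ediv_of_pos (by omega)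
  have d2 : ∀ a : Int, PySem.Int.floordiv a 86400 = a / 86400 := fun a =>
    PySem.Int.floordiv_eq_ediv_of_pos (by omega)
  have d3 : ∀ a : Int, PySem.Int.floordiv a 3600 = a / 3600 := fun a =>
    PySem.Int.floordiv_eq_ediv_of_pos (by omega)
  have d4 : ∀ a : Int, PySem.Int.floordiv a 60 = a / 60 := fun a =>
    PySem.Int.floordiv_eq_ediv_of_pos (by omega)
  have d5 : ∀ a : Int, PySem.Int.floordiv a 1 = a := fun a => by
    rw [PySem.Int.floordiv_eq_ediv_of_pos (by omega)]; omega
  have m1 : ∀ a : Int, PySem.Int.mod a 31536000 = a % 31536000 := fun a =>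
    PySem.Int.mod_eq_emod_of_pos (by omega)
  have m2 : ∀ a : Int, PySem.Int.mod a 86400 = a % 86400 := fun a =>
    PySem.Int.mod_eq_emod_of_pos (by omega)
  have m3 : ∀ a : Int, PySem.Int.mod a 3600 = a % 3600 := fun a =>
    PySem.Int.mod_eq_emod_of_pos (by omega)
  have m4 : ∀ a : Int, PySem.Int.mod a 60 = a % 60 := fun a =>
    PySem.Int.mod_eq_emod_of_pos (by omega)
  simp only [unitsB, pvDecomp, pvEntry, d1, d2, d3, d4, d5, m1, m2, m3, m4]
  split_ifs <;> simp_all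
  omega


lemma foldB (us : List (String × Int)) : ∀ (acc : List String) (s : Int),
    (us.foldl (fun (st : List String × Int) u =>
      (if PySem.Int.floordiv st.2 u.2 > 0 then
         st.1 ++ [PySem.Int.toStr (PySem.Int.floordiv st.2 u.2) ++ " " ++ u.1 ++
                  (if PySem.Int.floordiv st.2 u.2 > 1 then "s" else "")]
       else st.1, PySem.Int.mod st.2 u.2)) (acc, s)).1 = acc ++ (pvDecomp us s).map pvPiece := by
  induction us with
  | nil => intro acc s; simp [pvDecomp]
  | cons u rest ih =>
    intro acc s
    obtain ⟨n, uu⟩ := u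
    simp only [List.foldl_cons, pvDecomp, List.map_append, ih]
    by_cases hq : PySem.Int.floordiv s uu > 0
    · simp [hq, pvEntry, pvPiece]
    · simp [hq, pvEntry]


lemma fmt_fold (n : Int) : ∀ (L : List (String × Int)) (i0 : Int) (acc : String),
    n = i0 + L.length →
    (PySem.List.enumerate L i0).foldl (fun fstr x =>
      if x.1 + 1 = n then
        if x.2.2 > 1 then fstr ++ (PySem.Int.toStr x.2.2 ++ " " ++ x.2.1 ++ "s")
        else fstr ++ (PySem.Int.toStr x.2.2 ++ " " ++ x.2.1)
      else if x.1 + 2 < n then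
        if x.2.2 > 1 then fstr ++ (PySem.Int.toStr x.2.2 ++ " " ++ x.2.1 ++ "s, ")
        else fstr ++ (PySem.Int.toStr x.2.2 ++ " " ++ x.2.1 ++ ", ")
      else
        if x.2.2 > 1 then fstr ++ (PySem.Int.toStr x.2.2 ++ " " ++ x.2.1 ++ "s and ")
        else fstr ++ (PySem.Int.toStr x.2.2 ++ " " ++ x.2.1 ++ " and ")) acc
    = acc ++ pvFmtR L := by
  intro L
  induction L with
  | nil => intro i0 acc h; simp [PySem.List.enumerate_nil, pvFmtR]
  | cons p L ih =>
    intro i0 acc h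
    simp only [List.length_cons] at h
    rw [PySem.List.enumerate_cons, List.foldl_cons]
    cases L with
    | nil =>
      rw [PySem.List.enumerate_nil]
      simp only [List.foldl_nil]
      rw [if_pos (by simp at h; omega)]
      simp only [pvFmtR]
      split_ifs <;> rfl
    | cons q L' =>
      cases L' with
      | nil =>
        rw [if_neg (by simp at h ⊢; omega), if_neg (by simp at h ⊢; omega)]
        rw [ih (i0 + 1) _ (by simp at h ⊢; omega)]
        simp only [pvFmtR, List.isEmpty_nil, if_true]
        split_ifs <;> simp [String.append_assoc]
      | cons r L'' =>
        rw [if_neg (by simp at h ⊢; omega), if_pos (by simp at h ⊢; omega)]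
        rw [ih (i0 + 1) _ (by simp at h ⊢; omega)]
        simp only [pvFmtR, List.isEmpty_cons, if_false, Bool.false_eq_true]
        split_ifs <;> simp [String.append_assoc]


lemma pyGet_neg_one {α : Type} (x : α) (l : List α) :
    PySem.List.pyGet? (x :: l) (-1) = some ((x :: l).getLast (by simp)) := by
  simp [PySem.List.pyGet?, PySem.List.pyIdx?, List.getLast_eq_getElem]
  rfl

lemma assemble_cons (x : String) (ps : List String) (h : ps ≠ []) :
    pvAssemble (x :: ps) =
      if ps.length = 1 then x ++ " and " ++ (PySem.List.pyGet? ps 0).getD ""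
      else x ++ ", " ++ pvAssemble ps := by
  obtain ⟨y, t, rfl⟩ := List.exists_cons_of_ne_nil h
  cases t with
  | nil =>
    have hlast : PySem.List.pyGet? [x, y] (-1) = some y := by
      simp [PySem.List.pyGet?, PySem.List.pyIdx?]
    have hz : PySem.List.pyGet? [y] (0 : Int) = some y := by
      simp [PySem.List.pyGet?, PySem.List.pyIdx?]
    have hd : ([x, y] : List String).dropLast = [x] := rfl
    have hj : PySem.Str.join ", " [x] = x := by
      apply String.toList_inj.mp
      simp [PySem.Str.toList_join, PySem.Chars.join_singleton]
    rw [if_pos (show ([y] : List String).length = 1 from rfl)]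
    unfold pvAssemble
    rw [if_neg (show ¬ ([x, y] : List String).length = 1 from by simp)]
    rw [PySem.List.slice_to_neg_one, hd, hj, hlast, hz]
  | cons r t' =>
    simp only [pvAssemble, List.length_cons]
    rw [PySem.List.slice_to_neg_one, PySem.List.slice_to_neg_one, pyGet_neg_one, pyGet_neg_one]
    rw [if_neg (by simp), if_neg (by simp)]
    rw [List.getLast_cons (by simp)]
    have hj : PySem.Str.join ", " ((x :: y :: r :: t').dropLast)
        = x ++ ", " ++ PySem.Str.join ", " ((y :: r :: t').dropLast) := by
      rw [List.dropLast_cons₂, List.dropLast_cons₂]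
      apply String.toList_inj.mp
      simp [PySem.Str.toList_join, PySem.Chars.join_cons_cons, String.toList_append]
    rw [hj]
    simp [String.append_assoc]

lemma piece_alone (p : String × Int) :
    (if p.2 > 1 then PySem.Int.toStr p.2 ++ " " ++ p.1 ++ "s"
     else PySem.Int.toStr p.2 ++ " " ++ p.1) = pvPiece p := by
  unfold pvPiece
  split_ifs <;> simp

lemma piece_and (p : String × Int) :
    (if p.2 > 1 then PySem.Int.toStr p.2 ++ " " ++ p.1 ++ "s and "
     else PySem.Int.toStr p.2 ++ " " ++ p.1 ++ " and ") = pvPiece p ++ " and " := by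
  unfold pvPiece
  split_ifs <;> (apply String.toList_inj.mp; simp [String.toList_append])

lemma piece_comma (p : String × Int) :
    (if p.2 > 1 then PySem.Int.toStr p.2 ++ " " ++ p.1 ++ "s, "
     else PySem.Int.toStr p.2 ++ " " ++ p.1 ++ ", ") = pvPiece p ++ ", " := by
  unfold pvPiece
  split_ifs <;> (apply String.toList_inj.mp; simp [String.toList_append])

lemma fmtR_eq_assemble : ∀ (L : List (String × Int)), L ≠ [] →
    pvFmtR L = pvAssemble (L.map pvPiece) := by
  intro L
  induction L with
  | nil => intro h; exact absurd rfl h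
  | cons p L ih =>
    intro _
    cases L with
    | nil =>
      simp only [pvFmtR]
      rw [piece_alone]
      unfold pvAssemble
      rw [if_pos (show (List.map pvPiece [p]).length = 1 from rfl)]
      simp [PySem.List.pyGet?, PySem.List.pyIdx?]
    | cons q L' =>
      rw [List.map_cons, assemble_cons _ _ (by simp)]
      cases L' with
      | nil =>
        rw [show pvFmtR [p, q]
            = (if p.2 > 1 then PySem.Int.toStr p.2 ++ " " ++ p.1 ++ "s and "
               else PySem.Int.toStr p.2 ++ " " ++ p.1 ++ " and ") ++ pvFmtR [q] from by
          simp [pvFmtR]]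
        rw [piece_and]
        simp only [pvFmtR]
        rw [piece_alone, if_pos (show (List.map pvPiece [q]).length = 1 from rfl)]
        simp [PySem.List.pyGet?, PySem.List.pyIdx?, String.append_assoc]
      | cons r L'' =>
        have hne : (q :: r :: L'' : List (String × Int)) ≠ [] := by simp
        rw [← ih hne]
        have hlen : (List.map pvPiece (q :: r :: L'')).length ≠ 1 := by
          simp
        rw [if_neg hlen]
        rw [show pvFmtR (p :: q :: r :: L'')
            = (if p.2 > 1 then PySem.Int.toStr p.2 ++ " " ++ p.1 ++ "s, "
               else PySem.Int.toStr p.2 ++ " " ++ p.1 ++ ", ") ++ pvFmtR (q :: r :: L'') from by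
          simp [pvFmtR]]
        rw [piece_comma]

-- ===== VERDICT (by name: the statement is the Claim_ definition above) =====

theorem convert_spec : Claim_equal_convert := by
  intro s _
  unfold Spec_convert
  by_cases h0 : s = 0
  · simp [convert, convert_alt, h0]
  by_cases hneg : s < 0
  · rw [convert, if_neg h0, convert_alt, if_neg h0, if_pos hneg]
    rw [show (8 : Nat) = 7 + 1 from rfl, convertLoop, if_neg (by omega)]
    simp [convertFmt, PySem.List.enumerate_nil, PySem.Dict.empty]
  · have hpos : 0 < s := by omega
    rw [convert, if_neg h0, convert_alt, if_neg h0, if_neg hneg]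
    rw [show (8 : Nat) = 3 + 1 + 1 + 1 + 1 + 1 from rfl, loop_top 3 s (by omega)]
    rw [show (convertFmt (PySem.Dict.mk (pvDecomp unitsB s)))
        = "" ++ pvFmtR (pvDecomp unitsB s) from
      fmt_fold (((PySem.Dict.mk (pvDecomp unitsB s)).size : Int)) (pvDecomp unitsB s) 0 "" (by
        simp [PySem.Dict.size])]
    rw [String.empty_append, fmtR_eq_assemble _ (decomp_ne_nil s hpos)]
    rw [foldB]
    simp only [List.nil_append]
    rfl
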